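-- pv_equiv track=rewrite | github.com/bitw1ze/crypto-puzzles | p19.py | calc_score
-- ===== SOURCE A (Python) =====
-- import string
--
-- def calc_score(pt):
--     ''' our good friend from problem 3 is back again! '''
--     score = 0
--     charpoints = {'e':12, 't':9, 'a':8, 'o':8, 'i':7, 'n':7, 's':6, 'h':6, 'r':6, 'd':4, 'u':4}
--
--     for x in pt:
--         x = chr(x)
--         if x not in string.printable:
--             score -= 10
--         elif x == ' ':
--             score += 13
--         elif x in charpoints.keys():
--             score += charpoints[x]
--         elif x in string.ascii_lowercase:
--             score += 3
--         elif x in string.ascii_uppercase: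
--             score += 2
--         else:
--             score += 1
--     return score
-- ===== SOURCE B (Python) =====
-- import string
--
-- _CHARPOINTS = {'e': 12, 't': 9, 'a': 8, 'o': 8, 'i': 7, 'n': 7,
--                's': 6, 'h': 6, 'r': 6, 'd': 4, 'u': 4}
--
--
-- def _weight(v):
--     ''' score contributed by one character code '''
--     ch = chr(v)
--     if ch not in string.printable:
--         return -10
--     if ch == ' ':
--         return 13
--     if ch in _CHARPOINTS:
--         return _CHARPOINTS[ch]
--     if ch in string.ascii_lowercase:
--         return 3
--     if ch in string.ascii_uppercase:
--         return 2
--     return 1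
--
--
-- def calc_score(pt):
--     ''' tally distinct byte values first, then one weighted pass over them '''
--     counts = {}
--     for x in pt:
--         counts[x] = counts.get(x, 0) + 1
--     return sum(_weight(v) * c for v, c in counts.items())
-- ===== Notes on version B (the rewrite author's own statement) =====
-- stated objective: alternative
-- what changed: B tallies byte frequencies into a dict first and then does one weighted pass over the distinct values (sum of weight(v)*count), instead of A's per-byte branch-cascade accumulation over the whole input.
import Mathlib
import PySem

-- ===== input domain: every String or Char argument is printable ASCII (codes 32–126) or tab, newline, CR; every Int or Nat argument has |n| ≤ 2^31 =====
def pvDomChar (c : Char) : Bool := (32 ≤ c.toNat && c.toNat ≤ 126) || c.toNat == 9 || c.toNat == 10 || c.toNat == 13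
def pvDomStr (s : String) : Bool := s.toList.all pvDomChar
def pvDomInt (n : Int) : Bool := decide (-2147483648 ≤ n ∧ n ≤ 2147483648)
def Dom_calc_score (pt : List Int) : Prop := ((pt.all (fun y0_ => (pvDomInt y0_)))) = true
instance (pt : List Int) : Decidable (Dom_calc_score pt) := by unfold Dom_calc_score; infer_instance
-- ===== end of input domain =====

-- B replaces A's per-byte branch-cascade accumulation by a frequency tally over distinct
-- byte values followed by one weighted pass (alternative decomposition, same cost).

-- ===== PORT A =====
-- 'chr(x) in string.printable' is exact as a code-range test: printable is exactly
-- the codes 9..13 and 32..126, and chr is injective.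
def pvPrintable (x : Int) : Bool := decide ((32 ≤ x ∧ x ≤ 126) ∨ (9 ≤ x ∧ x ≤ 13))

-- the charpoints dict, keyed by character code (chr is injective, so this is exact)
def pvCharpoints : PySem.Dict Int Int :=
  PySem.Dict.ofList [(101, 12), (116, 9), (97, 8), (111, 8), (105, 7), (110, 7),
                     (115, 6), (104, 6), (114, 6), (100, 4), (117, 4)]

-- literal transliteration of A's loop; 'charpoints[x]' is guarded by the membership
-- test, so getD is exact there; lowercase/uppercase membership as code ranges (exact)
def calc_score (pt : List Int) : Int :=
  pt.foldl (fun score x =>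
    if !pvPrintable x then score - 10
    else if x = 32 then score + 13
    else if pvCharpoints.contains x then score + pvCharpoints.getD x 0
    else if 97 ≤ x ∧ x ≤ 122 then score + 3
    else if 65 ≤ x ∧ x ≤ 90 then score + 2
    else score + 1) 0

-- ===== PORT B =====
-- Source B's _weight: the same cascade as a per-code weight function
def pvWeight (v : Int) : Int :=
  if !pvPrintable v then -10
  else if v = 32 then 13
  else if pvCharpoints.contains v then pvCharpoints.getD v 0
  else if 97 ≤ v ∧ v ≤ 122 then 3
  else if 65 ≤ v ∧ v ≤ 90 then 2
  else 1

-- Source B's calc_score: tally counts into a dict, then sum weight(v)*c over its items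
def calc_score_alt (pt : List Int) : Int :=
  let counts := pt.foldl (fun d x => d.insert x (d.getD x 0 + 1)) PySem.Dict.empty
  counts.items.foldl (fun s p => s + pvWeight p.1 * p.2) 0

-- ===== PRECONDITION & SPEC =====
-- Pre_ excludes exactly the inputs where chr(x) raises ValueError (x < 0 or x > 0x10FFFF).
def Pre_calc_score (pt : List Int) : Prop := ∀ x ∈ pt, 0 ≤ x ∧ x ≤ 1114111
instance (pt : List Int) : Decidable (Pre_calc_score pt) := by unfold Pre_calc_score; infer_instance

def pvWitness_calc_score : List Int := [104, 101, 108, 108, 111, 32, 65]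

def Spec_calc_score (pt : List Int) (out : Int) : Prop := out = calc_score_alt pt
instance (pt : List Int) (out : Int) : Decidable (Spec_calc_score pt out) := by unfold Spec_calc_score; infer_instance

-- ===== CLAIM (what is proved, stated in full; the proofs are below) =====
def Claim_equal_calc_score : Prop := ∀ (pt : List Int), Dom_calc_score pt → Pre_calc_score pt → Spec_calc_score pt (calc_score pt)

-- ===== LEMMAS AND PROOFS =====

-- A's branch cascade adds exactly pvWeight x to the accumulator
theorem calc_score_step (score x : Int) :
    (if !pvPrintable x then score - 10
     else if x = 32 then score + 13
     else if pvCharpoints.contains x then score + pvCharpoints.getD x 0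
     else if 97 ≤ x ∧ x ≤ 122 then score + 3
     else if 65 ≤ x ∧ x ≤ 90 then score + 2
     else score + 1) = score + pvWeight x := by
  unfold pvWeight
  split_ifs <;> ring

-- A computes the plain sum of weights
theorem calc_score_eq_sum (pt : List Int) :
    calc_score pt = (pt.map pvWeight).sum := by
  unfold calc_score
  simp only [calc_score_step]
  induction pt using List.reverseRecOn with
  | nil => rfl
  | append_singleton xs x ih => simp [List.foldl_append, ih]

-- in a Nodup list containing x, the δ-sum picks out exactly c
theorem sum_map_ite_eq_of_nodup (l : List Int) (x : Int) (c : Int)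
    (hnd : l.Nodup) (hx : x ∈ l) :
    (l.map (fun k => if k = x then c else 0)).sum = c := by
  induction l with
  | nil => cases hx
  | cons a l ih =>
    by_cases h : a = x
    · subst h
      have hz : (l.map (fun k => if k = a then c else 0)).sum = 0 := by
        rw [List.sum_eq_zero]
        intro y hy
        rcases List.mem_map.mp hy with ⟨k, hk, rfl⟩
        have hne : k ≠ a := fun e => (List.nodup_cons.mp hnd).1 (e ▸ hk)
        simp [hne]
      simp [hz]
    · have hx' : x ∈ l := by
        rcases List.mem_cons.mp hx with h' | h'
        · exact absurd h'.symm h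
        · exact h'
      simp [h, ih (List.nodup_cons.mp hnd).2 hx']

-- weighted sum over the deduplicated values with multiplicities = plain sum of weights
theorem sum_dedup_weighted (w : Int → Int) (xs : List Int) :
    ((PySem.Set.ofList xs).map (fun k => w k * (xs.count k : Int))).sum
      = (xs.map w).sum := by
  induction xs using List.reverseRecOn with
  | nil => rfl
  | append_singleton xs x ih =>
    rw [PySem.Set.ofList_append_singleton]
    have hcount : ∀ k : Int, ((xs ++ [x]).count k : Int)
        = (xs.count k : Int) + (if k = x then 1 else 0) := by
      intro k
      rw [List.count_append]
      push_cast
      by_cases h : k = x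
      · simp [h]
      · have h2 : x ≠ k := fun e => h e.symm
        simp [h, h2]
    have hmap : ∀ (l : List Int),
        (l.map (fun k => w k * ((xs ++ [x]).count k : Int))).sum
          = (l.map (fun k => w k * (xs.count k : Int))).sum
            + (l.map (fun k => if k = x then w x else 0)).sum := by
      intro l
      induction l with
      | nil => simp
      | cons a l ihl =>
        simp only [List.map_cons, List.sum_cons, ihl, hcount a]
        by_cases h : a = x
        · subst h; ring_nf; simp; ring
        · simp [h]; ring
    by_cases hmem : x ∈ PySem.Set.ofList xs
    · rw [PySem.Set.add_of_mem hmem, hmap,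
        sum_map_ite_eq_of_nodup _ x (w x) (PySem.Set.nodup_ofList xs) hmem]
      simp [ih]
    · rw [PySem.Set.add_of_not_mem hmem]
      simp only [List.map_append, List.sum_append, hmap]
      have hz : ((PySem.Set.ofList xs).map (fun k => if k = x then w x else 0)).sum = 0 := by
        rw [List.sum_eq_zero]
        intro y hy
        rcases List.mem_map.mp hy with ⟨k, hk, rfl⟩
        have : k ≠ x := fun e => hmem (e ▸ hk)
        simp [this]
      have hxc : x ∉ xs := by simpa [PySem.Set.mem_ofList] using hmem
      simp [hz, ih, List.count_eq_zero_of_not_mem hxc]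

-- B computes the plain sum of weights too
theorem calc_score_alt_eq_sum (pt : List Int) :
    calc_score_alt pt = (pt.map pvWeight).sum := by
  show (pt.foldl (fun d x => d.insert x (d.getD x 0 + 1)) PySem.Dict.empty).items.foldl
      (fun s p => s + pvWeight p.1 * p.2) 0 = (pt.map pvWeight).sum
  rw [PySem.Dict.foldl_insert_getD_add_one_eq_counter, PySem.Dict.items_counter]
  have : ∀ (l : List (Int × Int)) (s : Int),
      l.foldl (fun s p => s + pvWeight p.1 * p.2) s
        = s + (l.map (fun p => pvWeight p.1 * p.2)).sum := by
    intro l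
    induction l with
    | nil => simp
    | cons a l ihl => intro s; simp [ihl, add_assoc]
  rw [this, List.map_map]
  simpa using sum_dedup_weighted pvWeight pt

-- ===== VERDICT (by name: the statement is the Claim_ definition above) =====
theorem calc_score_spec : Claim_equal_calc_score := by
  intro pt _ _
  unfold Spec_calc_score
  rw [calc_score_eq_sum, calc_score_alt_eq_sum]
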